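-- pv_equiv track=rewrite | github.com/Speeditidious/OJIK-BMS | api/app/services/ranking_dashboard.py | _env_rank
-- ===== SOURCE A (Python) =====
-- from collections.abc import Iterable
--
-- def _env_rank(client_types: Iterable[str]) -> int:
--     unique = {client_type for client_type in client_types if client_type}
--     if not unique:
--         return 3
--     if len(unique) > 1:
--         return 2
--     only = next(iter(unique))
--     if only == "lr2":
--         return 0
--     if only == "beatoraja":
--         return 1
--     return 2
-- ===== SOURCE B (Python) =====
-- from collections.abc import Iterable
--
-- def _env_rank(client_types: Iterable[str]) -> int:
--     values = list(client_types)
--     has_lr2 = "lr2" in values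
--     has_oraja = "beatoraja" in values
--     has_other = any(v and v not in ("lr2", "beatoraja") for v in values)
--     if has_other or (has_lr2 and has_oraja):
--         return 2
--     if has_lr2:
--         return 0
--     if has_oraja:
--         return 1
--     return 3
-- ===== Notes on version B (the rewrite author's own statement) =====
-- stated objective: alternative
-- what changed: Replaces the distinct-set-cardinality analysis with a decision table over three independent membership predicates (contains 'lr2', contains 'beatoraja', contains any other truthy value), exploiting that any non-special truthy value already forces rank 2.
import Mathlib
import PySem

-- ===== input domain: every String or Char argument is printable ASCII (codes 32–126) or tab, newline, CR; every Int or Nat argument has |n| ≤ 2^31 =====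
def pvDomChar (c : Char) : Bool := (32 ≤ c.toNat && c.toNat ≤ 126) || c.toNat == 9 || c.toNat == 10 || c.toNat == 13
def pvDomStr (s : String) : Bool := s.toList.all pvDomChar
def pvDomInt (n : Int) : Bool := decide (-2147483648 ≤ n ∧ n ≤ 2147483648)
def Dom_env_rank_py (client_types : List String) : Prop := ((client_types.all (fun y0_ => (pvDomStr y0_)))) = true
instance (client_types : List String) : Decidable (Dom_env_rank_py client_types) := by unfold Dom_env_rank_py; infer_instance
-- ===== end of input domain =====

-- B replaces A's distinct-set-cardinality analysis with a decision table over three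
-- membership predicates (has 'lr2', has 'beatoraja', has another truthy value); return value only.

-- ===== PORT A =====
def env_rank_py (client_types : List String) : Int :=
  -- {ct for ct in client_types if ct} : set comprehension = set of truthy strings in order
  let unique : PySem.Set String :=
    PySem.Set.ofList (client_types.filter (fun ct => decide (ct ≠ "")))
  if unique = [] then 3
  else if PySem.Set.len unique > 1 then 2
  else
    -- next(iter(unique)): the sole element (len = 1 here, so order-independent)
    let only := unique.headD ""
    if only = "lr2" then 0
    else if only = "beatoraja" then 1
    else 2

-- ===== PORT B =====
def env_rank_py_alt (client_types : List String) : Int :=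
  let has_lr2 := client_types.contains "lr2"
  let has_oraja := client_types.contains "beatoraja"
  let has_other := client_types.any
    (fun v => decide (v ≠ "") && decide (v ≠ "lr2") && decide (v ≠ "beatoraja"))
  if has_other || (has_lr2 && has_oraja) then 2
  else if has_lr2 then 0
  else if has_oraja then 1
  else 3

-- ===== PRECONDITION & SPEC =====
def Spec_env_rank_py (client_types : List String) (out : Int) : Prop := out = env_rank_py_alt client_types
instance (client_types : List String) (out : Int) : Decidable (Spec_env_rank_py client_types out) := by unfold Spec_env_rank_py; infer_instance

-- ===== CLAIM (what is proved, stated in full; the proofs are below) =====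
def Claim_equal_env_rank_py : Prop := ∀ (client_types : List String), Dom_env_rank_py client_types → Spec_env_rank_py client_types (env_rank_py client_types)

-- ===== LEMMAS AND PROOFS =====

-- A's distinct set of truthy values
def pvU (l : List String) : PySem.Set String :=
  PySem.Set.ofList (l.filter (fun ct => decide (ct ≠ "")))

theorem pvU_mem_iff (l : List String) (x : String) (hx : x ≠ "") :
    x ∈ pvU l ↔ x ∈ l := by
  unfold pvU
  rw [PySem.Set.mem_ofList, List.mem_filter]
  simp [hx]

theorem pvU_truthy (l : List String) (x : String) (h : x ∈ pvU l) : x ≠ "" := by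
  unfold pvU at h
  rw [PySem.Set.mem_ofList, List.mem_filter] at h
  simpa using h.2

theorem pvU_nodup (l : List String) : (pvU l).Nodup := PySem.Set.nodup_ofList _

theorem env_rank_py_eq (l : List String) :
    env_rank_py l = env_rank_py_alt l := by
  have hl2 : l.contains "lr2" = true ↔ "lr2" ∈ pvU l := by
    rw [List.contains_iff_mem, pvU_mem_iff l _ (by decide)]
  have hbo : l.contains "beatoraja" = true ↔ "beatoraja" ∈ pvU l := by
    rw [List.contains_iff_mem, pvU_mem_iff l _ (by decide)]
  have hot : l.any (fun v => decide (v ≠ "") && decide (v ≠ "lr2") && decide (v ≠ "beatoraja")) = true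
      ↔ ∃ v ∈ pvU l, v ≠ "lr2" ∧ v ≠ "beatoraja" := by
    rw [List.any_eq_true]
    constructor
    · rintro ⟨v, hv, hp⟩
      simp only [Bool.and_eq_true, decide_eq_true_eq] at hp
      exact ⟨v, (pvU_mem_iff l v hp.1.1).2 hv, hp.1.2, hp.2⟩
    · rintro ⟨v, hv, h1, h2⟩
      have hne := pvU_truthy l v hv
      exact ⟨v, (pvU_mem_iff l v hne).1 hv, by simp [hne, h1, h2]⟩
  have keyA : env_rank_py l =
      (if pvU l = [] then (3 : Int)
       else if PySem.Set.len (pvU l) > 1 then 2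
       else if (pvU l).headD "" = "lr2" then 0
       else if (pvU l).headD "" = "beatoraja" then 1 else 2) := rfl
  have keyB : env_rank_py_alt l =
      (if l.any (fun v => decide (v ≠ "") && decide (v ≠ "lr2") && decide (v ≠ "beatoraja"))
            || (l.contains "lr2" && l.contains "beatoraja") then (2 : Int)
       else if l.contains "lr2" then 0
       else if l.contains "beatoraja" then 1 else 3) := rfl
  rw [keyA, keyB]
  cases hU : pvU l with
  | nil =>
    have h1 : l.contains "lr2" = false := by
      rw [← Bool.not_eq_true, hl2, hU]; simp
    have h2 : l.contains "beatoraja" = false := by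
      rw [← Bool.not_eq_true, hbo, hU]; simp
    have h3 : l.any (fun v => decide (v ≠ "") && decide (v ≠ "lr2") && decide (v ≠ "beatoraja")) = false := by
      rw [← Bool.not_eq_true, hot, hU]; simp
    rw [h1, h2, h3]
    simp
  | cons o rest =>
    cases rest with
    | nil =>
      -- single distinct truthy value o
      have hoU : o ∈ pvU l := by rw [hU]; exact List.mem_singleton_self o
      have honly : ∀ x, x ∈ pvU l → x = o := by
        intro x hx; rw [hU] at hx; simpa using hx
      by_cases ho2 : o = "lr2"
      · have h1 : l.contains "lr2" = true := hl2.2 (ho2 ▸ hoU)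
        have h2 : l.contains "beatoraja" = false := by
          rw [← Bool.not_eq_true, hbo]
          intro h; have := honly _ h; simp [ho2] at this
        have h3 : l.any (fun v => decide (v ≠ "") && decide (v ≠ "lr2") && decide (v ≠ "beatoraja")) = false := by
          rw [← Bool.not_eq_true, hot]
          rintro ⟨v, hv, hv1, -⟩; exact hv1 (honly v hv ▸ ho2 ▸ rfl)
        rw [h1, h2, h3]
        simp [PySem.Set.len, ho2]
      · by_cases ho3 : o = "beatoraja"
        · have h2 : l.contains "beatoraja" = true := hbo.2 (ho3 ▸ hoU)
          have h1 : l.contains "lr2" = false := by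
            rw [← Bool.not_eq_true, hl2]
            intro h; have := honly _ h; simp [ho3] at this
          have h3 : l.any (fun v => decide (v ≠ "") && decide (v ≠ "lr2") && decide (v ≠ "beatoraja")) = false := by
            rw [← Bool.not_eq_true, hot]
            rintro ⟨v, hv, -, hv2⟩; exact hv2 (honly v hv ▸ ho3 ▸ rfl)
          rw [h1, h2, h3]
          simp [PySem.Set.len, ho3]
        · have h3 : l.any (fun v => decide (v ≠ "") && decide (v ≠ "lr2") && decide (v ≠ "beatoraja")) = true := by
            rw [hot]; exact ⟨o, hoU, ho2, ho3⟩
          rw [h3]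
          simp [PySem.Set.len, ho2, ho3]
    | cons a b =>
      -- at least two distinct truthy values: both sides return 2
      have hlen : PySem.Set.len (o :: a :: b) > 1 := by
        simp only [PySem.Set.len, List.length_cons]; push_cast; omega
      have hoU : o ∈ pvU l := by rw [hU]; exact List.mem_cons_self
      have haU : a ∈ pvU l := by rw [hU]; exact List.mem_cons_of_mem _ List.mem_cons_self
      have hoa : o ≠ a := by
        have hnd := pvU_nodup l; rw [hU] at hnd
        exact fun h => (List.nodup_cons.1 hnd).1 (h ▸ List.mem_cons_self)
      rw [if_neg (by simp), if_pos hlen]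
      by_cases ho2 : o = "lr2"
      · by_cases ha3 : a = "beatoraja"
        · have h1 : l.contains "lr2" = true := hl2.2 (ho2 ▸ hoU)
          have h2 : l.contains "beatoraja" = true := hbo.2 (ha3 ▸ haU)
          rw [h1, h2]; simp
        · by_cases ha2 : a = "lr2"
          · exact absurd (ho2.trans ha2.symm) hoa
          · have h3 : l.any (fun v => decide (v ≠ "") && decide (v ≠ "lr2") && decide (v ≠ "beatoraja")) = true := by
              rw [hot]; exact ⟨a, haU, ha2, ha3⟩
            rw [h3]; simp
      · by_cases ho3 : o = "beatoraja"
        · by_cases ha2 : a = "lr2"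
          · have h1 : l.contains "lr2" = true := hl2.2 (ha2 ▸ haU)
            have h2 : l.contains "beatoraja" = true := hbo.2 (ho3 ▸ hoU)
            rw [h1, h2]; simp
          · by_cases ha3 : a = "beatoraja"
            · exact absurd (ho3.trans ha3.symm) hoa
            · have h3 : l.any (fun v => decide (v ≠ "") && decide (v ≠ "lr2") && decide (v ≠ "beatoraja")) = true := by
                rw [hot]; exact ⟨a, haU, ha2, ha3⟩
              rw [h3]; simp
        · have h3 : l.any (fun v => decide (v ≠ "") && decide (v ≠ "lr2") && decide (v ≠ "beatoraja")) = true := by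
            rw [hot]; exact ⟨o, hoU, ho2, ho3⟩
          rw [h3]; simp

-- ===== VERDICT (by name: the statement is the Claim_ definition above) =====
theorem env_rank_py_spec : Claim_equal_env_rank_py := by
  intro client_types _
  unfold Spec_env_rank_py
  exact env_rank_py_eq client_types
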